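-- pv_equiv track=rewrite | github.com/scrabg/scra | backend/crawl/engine/spider_engine.py | _zip_extracted_fields
-- ===== SOURCE A (Python) =====
-- def _zip_extracted_fields(extracted_data: dict) -> list:
--     """
--     将提取的字段进行ZIP操作，组合成一组一组的数据
--
--     Args:
--         extracted_data: 提取的数据字典，格式如 {'link': [...], 'title': [...]}
--
--     Returns:
--         list: ZIP后的数据列表，每个元素是一个字典包含所有字段的对应值
--     """
--     if not extracted_data:
--         return []
--
--     # 获取所有字段名
--     field_names = list(extracted_data.keys())
--     if not field_names:
--         return []
--
--     # 获取所有字段的值列表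
--     field_values = [extracted_data[field] for field in field_names]
--
--     # 使用zip将对应位置的值组合在一起
--     zipped_results = []
--     for values in zip(*field_values):
--         item = {}
--         for i, field_name in enumerate(field_names):
--             item[field_name] = values[i]
--         zipped_results.append(item)
--
--     return zipped_results
-- ===== SOURCE B (Python) =====
-- def _zip_extracted_fields(extracted_data: dict) -> list:
--     """Column-major transpose: pre-allocate the row dicts, then fill one field at a time."""
--     if not extracted_data:
--         return []
--     field_names = list(extracted_data.keys())
--     if not field_names:
--         return []
--     n = min(len(v) for v in extracted_data.values())
--     result = [{} for _ in range(n)]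
--     for field in field_names:
--         col = extracted_data[field]
--         for i in range(n):
--             result[i][field] = col[i]
--     return result
-- ===== Notes on version B (the rewrite author's own statement) =====
-- stated objective: alternative
-- what changed: Replaces the row-major zip(*values) loop that builds each row dict in full with a column-major transpose: a min-length pass, pre-allocated empty row dicts, and one pass per field filling its column into every row.
import Mathlib
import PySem

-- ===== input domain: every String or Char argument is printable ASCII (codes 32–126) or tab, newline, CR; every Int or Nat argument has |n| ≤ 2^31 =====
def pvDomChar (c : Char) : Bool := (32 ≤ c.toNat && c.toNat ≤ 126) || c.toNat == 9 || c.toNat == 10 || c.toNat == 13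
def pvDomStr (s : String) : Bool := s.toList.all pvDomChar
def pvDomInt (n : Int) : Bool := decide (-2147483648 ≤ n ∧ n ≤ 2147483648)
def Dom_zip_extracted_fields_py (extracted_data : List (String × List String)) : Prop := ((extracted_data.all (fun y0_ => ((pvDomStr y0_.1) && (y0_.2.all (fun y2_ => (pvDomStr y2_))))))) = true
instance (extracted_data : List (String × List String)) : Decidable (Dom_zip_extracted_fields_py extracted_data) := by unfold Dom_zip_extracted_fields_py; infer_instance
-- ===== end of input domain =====

-- B fills the rows column-major (min-length pass, pre-allocated row dicts, one pass per field)
-- instead of A's row-major zip(*values) loop: an alternative traversal of the same cost.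

-- ===== PORT A =====
-- faithful model of Python's zip(*fieldValues): one row per index below the length of the
-- shortest list; every index accessed is in range, so the getD default is never taken
def zipStarRows (fieldValues : List (List String)) : List (List String) :=
  (List.range (((fieldValues.map List.length).min?).getD 0)).map
    (fun i => fieldValues.map (fun l => l.getD i ""))

def zip_extracted_fields_py (extracted_data : List (String × List String)) : List (List (String × String)) :=
  let d := PySem.Dict.ofList extracted_data
  if d.items = [] then [] else
  let fieldNames := d.keys
  if fieldNames = [] then [] else
  let fieldValues := fieldNames.map (fun f => d.getD f [])
  (zipStarRows fieldValues).map (fun values =>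
    ((PySem.List.enumerate fieldNames 0).foldl
      (fun (item : PySem.Dict String String) p =>
        item.insert p.2 (PySem.List.pyGetD values p.1 "")) PySem.Dict.empty).items)

-- ===== PORT B =====
def zip_extracted_fields_py_alt (extracted_data : List (String × List String)) : List (List (String × String)) :=
  let d := PySem.Dict.ofList extracted_data
  if d.items = [] then [] else
  let fieldNames := d.keys
  if fieldNames = [] then [] else
  let n := ((d.values.map List.length).min?).getD 0
  let result := fieldNames.foldl
    (fun (res : List (PySem.Dict String String)) f =>
      let col := d.getD f []
      res.zipIdx.map (fun p => p.1.insert f (col.getD p.2 "")))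
    (List.replicate n PySem.Dict.empty)
  result.map PySem.Dict.items

-- ===== PRECONDITION & SPEC =====
def Spec_zip_extracted_fields_py (extracted_data : List (String × List String)) (out : List (List (String × String))) : Prop := out = zip_extracted_fields_py_alt extracted_data
instance (extracted_data : List (String × List String)) (out : List (List (String × String))) : Decidable (Spec_zip_extracted_fields_py extracted_data out) := by unfold Spec_zip_extracted_fields_py; infer_instance

-- ===== CLAIM (what is proved, stated in full; the proofs are below) =====
def Claim_equal_zip_extracted_fields_py : Prop := ∀ (extracted_data : List (String × List String)), Dom_zip_extracted_fields_py extracted_data → Spec_zip_extracted_fields_py extracted_data (zip_extracted_fields_py extracted_data)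

-- ===== LEMMAS AND PROOFS =====

-- B's inner fold: inserting distinct fresh keys into an empty dict appends them in key order
theorem rowB_items (names : List String) (g : String → String) (hnd : names.Nodup) :
    (names.foldl (fun (dd : PySem.Dict String String) f => dd.insert f (g f)) PySem.Dict.empty).items
    = names.map (fun f => (f, g f)) := by
  have h := PySem.Dict.items_foldl_insert_fresh names (fun f => f) g PySem.Dict.empty
    (by intro a _; simp [PySem.Dict.contains_empty]) (by simpa using hnd)
  simpa using h

-- A's inner loop over enumerate: same items list, the value fetched through the row tuple
theorem rowA_items (names : List String) (g : String → String) (hnd : names.Nodup) :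
    ((PySem.List.enumerate names 0).foldl
      (fun (item : PySem.Dict String String) p =>
        item.insert p.2 (PySem.List.pyGetD (names.map g) p.1 "")) PySem.Dict.empty).items
    = names.map (fun f => (f, g f)) := by
  have h := PySem.Dict.items_foldl_insert_fresh (PySem.List.enumerate names 0) (fun p => p.2)
    (fun p => PySem.List.pyGetD (names.map g) p.1 "") PySem.Dict.empty
    (by intro a _; simp [PySem.Dict.contains_empty])
    (by rw [PySem.List.map_snd_enumerate]; exact hnd)
  rw [h]
  simp only [PySem.Dict.empty, List.nil_append]
  apply List.ext_getElem
  · simp [PySem.List.length_enumerate]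
  · intro k h1 h2
    have hk : k < names.length := by simpa [PySem.List.length_enumerate] using h1
    simp only [List.getElem_map, PySem.List.getElem_enumerate]
    simp [PySem.List.pyGetD_natCast, List.getD, hk]

-- B's outer fold read off at one row index: the fold over fields commutes with indexing
theorem foldB_getElem? (names : List String) (d : PySem.Dict String (List String))
    (res : List (PySem.Dict String String)) (i : Nat) :
    (names.foldl
      (fun (res : List (PySem.Dict String String)) f =>
        res.zipIdx.map (fun p => p.1.insert f ((d.getD f []).getD p.2 ""))) res)[i]?
    = res[i]?.map (fun r => names.foldl (fun (dd : PySem.Dict String String) f => dd.insert f ((d.getD f []).getD i "")) r) := by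
  induction names generalizing res with
  | nil => simp
  | cons f rest ih =>
    rw [List.foldl_cons, ih]
    simp only [List.getElem?_map, List.getElem?_zipIdx, Option.map_map]
    cases res[i]? <;> simp

-- ===== VERDICT (by name: the statement is the Claim_ definition above) =====
theorem zip_extracted_fields_py_spec : Claim_equal_zip_extracted_fields_py := by
  intro l _
  unfold Spec_zip_extracted_fields_py zip_extracted_fields_py zip_extracted_fields_py_alt zipStarRows
  have hnd : (PySem.Dict.ofList l).keys.Nodup := PySem.Dict.nodup_keys_ofList l
  have hvals : (PySem.Dict.ofList l).values
      = (PySem.Dict.ofList l).keys.map (fun k => (PySem.Dict.ofList l).getD k []) :=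
    PySem.Dict.values_eq_map_keys _ hnd []
  by_cases h1 : (PySem.Dict.ofList l).items = []
  · simp [h1]
  by_cases h2 : (PySem.Dict.ofList l).keys = []
  · simp [h1, h2]
  simp only [if_neg h1, if_neg h2]
  rw [hvals, List.map_map]
  apply List.ext_getElem?
  intro i
  rw [List.getElem?_map, List.getElem?_map, foldB_getElem?, List.getElem?_replicate]
  by_cases hi : i < (List.map List.length
      (List.map (fun f => (PySem.Dict.ofList l).getD f []) (PySem.Dict.ofList l).keys)).min?.getD 0
  · rw [List.getElem?_range hi, if_pos hi]
    simp only [Option.map_some, Function.comp]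
    rw [List.map_map]
    rw [rowA_items _ _ hnd, rowB_items _ _ hnd]
    rfl
  · rw [List.getElem?_eq_none (by simpa using Nat.le_of_not_lt hi), if_neg hi]
    rfl
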